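-- pv_equiv track=rewrite | github.com/AINative-Studio/wwmaa | backend/utils/security.py | validate_command_arguments
-- ===== SOURCE A (Python) =====
-- from typing import List, Optional, Dict
--
-- def validate_command_arguments(args: List[str]) -> bool:
--     """
--     Validate command arguments for dangerous patterns
--
--     Args:
--         args: List of command arguments
--
--     Returns:
--         True if arguments are safe, False otherwise
--     """
--     dangerous_patterns = [
--         ';', '|', '&', '$', '`', '\n', '\r',
--         '>', '<', '$(', '${',
--     ]
--
--     for arg in args:
--         for pattern in dangerous_patterns:
--             if pattern in arg:
--                 return False
--
--     return True
-- ===== SOURCE B (Python) =====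
-- _DANGEROUS_CHARS = frozenset(";|&$`\n\r><")
--
-- def validate_command_arguments(args):
--     """
--     Validate command arguments for dangerous patterns.
--
--     The multi-character patterns '$(' and '${' are subsumed by '$', so an
--     argument is safe iff none of its characters is a dangerous metacharacter.
--     """
--     return all(c not in _DANGEROUS_CHARS for arg in args for c in arg)
-- ===== Notes on version B (the rewrite author's own statement) =====
-- stated objective: simpler
-- what changed: Replaces the nested substring scan over an 11-pattern list (where '$(' and '${' are subsumed by '$') by a single pass over the characters of each argument with membership in a 9-character dangerous set.
import Mathlib
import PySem

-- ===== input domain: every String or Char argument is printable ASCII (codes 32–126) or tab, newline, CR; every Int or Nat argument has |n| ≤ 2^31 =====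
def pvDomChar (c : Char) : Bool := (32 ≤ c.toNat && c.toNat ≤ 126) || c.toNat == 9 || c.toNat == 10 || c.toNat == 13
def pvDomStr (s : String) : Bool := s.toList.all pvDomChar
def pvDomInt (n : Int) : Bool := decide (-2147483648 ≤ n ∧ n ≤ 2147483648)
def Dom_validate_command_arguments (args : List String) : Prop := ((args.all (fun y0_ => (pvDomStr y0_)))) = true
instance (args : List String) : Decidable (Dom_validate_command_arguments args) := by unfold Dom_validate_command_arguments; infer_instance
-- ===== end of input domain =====

-- B replaces A's nested substring scan over an 11-pattern list by one pass over each
-- argument's characters with membership in a 9-character set (objective: simpler).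

-- ===== PORT A =====
-- the dangerous_patterns list, in A's order
def vcaPatterns : List String := [";", "|", "&", "$", "`", "\n", "\r", ">", "<", "$(", "${"]

-- inner 'for pattern in dangerous_patterns: if pattern in arg: return False'
def vcaArgHit (arg : String) (pats : List String) : Bool :=
  match pats with
  | [] => false
  | p :: rest => if PySem.Str.isIn p arg then true else vcaArgHit arg rest

-- outer 'for arg in args' with early return False
def validate_command_arguments (args : List String) : Bool :=
  match args with
  | [] => true
  | a :: rest => if vcaArgHit a vcaPatterns then false else validate_command_arguments rest

-- ===== PORT B =====
def vcaDangerousChars : PySem.Set Char :=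
  PySem.Set.ofList [';', '|', '&', '$', '`', '\n', '\r', '>', '<']

def validate_command_arguments_alt (args : List String) : Bool :=
  args.all (fun arg => arg.toList.all (fun c => !(PySem.Set.contains vcaDangerousChars c)))

-- ===== PRECONDITION & SPEC =====
def Spec_validate_command_arguments (args : List String) (out : Bool) : Prop := out = validate_command_arguments_alt args
instance (args : List String) (out : Bool) : Decidable (Spec_validate_command_arguments args out) := by unfold Spec_validate_command_arguments; infer_instance

-- ===== CLAIM (what is proved, stated in full; the proofs are below) =====
def Claim_equal_validate_command_arguments : Prop := ∀ (args : List String), Dom_validate_command_arguments args → Spec_validate_command_arguments args (validate_command_arguments args)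

-- ===== LEMMAS AND PROOFS =====

theorem singleton_infix_iff_mem {α : Type} (c : α) (l : List α) : [c] <:+: l ↔ c ∈ l := by
  constructor
  · intro h
    exact h.subset (List.mem_singleton_self c)
  · intro h
    obtain ⟨s, t, rfl⟩ := List.append_of_mem h
    exact ⟨s, t, by simp⟩

theorem mem_of_infix_head {α : Type} (c : α) (d : α) (l m : List α)
    (h : (c :: d :: m) <:+: l) : c ∈ l :=
  h.subset (by simp)

-- the inner pattern loop is an 'any' over the pattern list
theorem argHit_any (arg : String) (pats : List String) :
    vcaArgHit arg pats = pats.any (fun p => PySem.Str.isIn p arg) := by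
  induction pats with
  | nil => rfl
  | cons p ps ih => simp [vcaArgHit, List.any_cons, ih]

-- per-argument: A's pattern scan hits iff some character of the argument is dangerous
theorem argHit_eq (arg : String) :
    vcaArgHit arg vcaPatterns
      = arg.toList.any (fun c => PySem.Set.contains vcaDangerousChars c) := by
  rw [argHit_any, Bool.eq_iff_iff]
  simp only [vcaPatterns, List.any_cons, List.any_nil, Bool.or_eq_true, Bool.false_eq_true,
    or_false, PySem.Str.isIn_iff_infix, List.any_eq_true, vcaDangerousChars,
    PySem.Set.contains_iff, PySem.Set.mem_ofList]
  constructor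
  · rintro (h | h | h | h | h | h | h | h | h | h | h)
    · exact ⟨';', (singleton_infix_iff_mem _ _).mp h, by decide⟩
    · exact ⟨'|', (singleton_infix_iff_mem _ _).mp h, by decide⟩
    · exact ⟨'&', (singleton_infix_iff_mem _ _).mp h, by decide⟩
    · exact ⟨'$', (singleton_infix_iff_mem _ _).mp h, by decide⟩
    · exact ⟨'`', (singleton_infix_iff_mem _ _).mp h, by decide⟩
    · exact ⟨'\n', (singleton_infix_iff_mem _ _).mp h, by decide⟩
    · exact ⟨'\r', (singleton_infix_iff_mem _ _).mp h, by decide⟩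
    · exact ⟨'>', (singleton_infix_iff_mem _ _).mp h, by decide⟩
    · exact ⟨'<', (singleton_infix_iff_mem _ _).mp h, by decide⟩
    · exact ⟨'$', mem_of_infix_head _ _ _ _ h, by decide⟩
    · exact ⟨'$', mem_of_infix_head _ _ _ _ h, by decide⟩
  · rintro ⟨c, hc, hmem⟩
    have hm : c = ';' ∨ c = '|' ∨ c = '&' ∨ c = '$' ∨ c = '`' ∨ c = '\n' ∨ c = '\r' ∨
        c = '>' ∨ c = '<' := by simpa using hmem
    have hs : [c] <:+: arg.toList := (singleton_infix_iff_mem _ _).mpr hc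
    rcases hm with rfl | rfl | rfl | rfl | rfl | rfl | rfl | rfl | rfl
    · exact Or.inl hs
    · exact Or.inr (Or.inl hs)
    · exact Or.inr (Or.inr (Or.inl hs))
    · exact Or.inr (Or.inr (Or.inr (Or.inl hs)))
    · exact Or.inr (Or.inr (Or.inr (Or.inr (Or.inl hs))))
    · exact Or.inr (Or.inr (Or.inr (Or.inr (Or.inr (Or.inl hs)))))
    · exact Or.inr (Or.inr (Or.inr (Or.inr (Or.inr (Or.inr (Or.inl hs))))))
    · exact Or.inr (Or.inr (Or.inr (Or.inr (Or.inr (Or.inr (Or.inr (Or.inl hs)))))))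
    · exact Or.inr (Or.inr (Or.inr (Or.inr (Or.inr (Or.inr (Or.inr (Or.inr (Or.inl hs))))))))

theorem vca_eq_alt (args : List String) :
    validate_command_arguments args = validate_command_arguments_alt args := by
  induction args with
  | nil => rfl
  | cons a rest ih =>
    show (if vcaArgHit a vcaPatterns then false else validate_command_arguments rest) = _
    rw [argHit_eq, ih]
    simp only [validate_command_arguments_alt, List.all_cons]
    cases h : a.toList.any (fun c => PySem.Set.contains vcaDangerousChars c)
    · have hall : a.toList.all (fun c => !(PySem.Set.contains vcaDangerousChars c)) = true := by
        simp only [List.any_eq_false] at h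
        simp only [List.all_eq_true, Bool.not_eq_true']
        intro x hx
        exact Bool.eq_false_iff.mpr (h x hx)
      rw [hall, Bool.true_and]
      rfl
    · have hall : a.toList.all (fun c => !(PySem.Set.contains vcaDangerousChars c)) = false := by
        rcases List.any_eq_true.mp h with ⟨c, hc, hcd⟩
        exact List.all_eq_false.mpr ⟨c, hc, by rw [hcd]; decide⟩
      rw [hall, Bool.false_and]
      rfl

-- ===== VERDICT (by name: the statement is the Claim_ definition above) =====
theorem validate_command_arguments_spec : Claim_equal_validate_command_arguments := by
  intro args _
  exact vca_eq_alt args
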